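-- pv_equiv track=rewrite | github.com/bulba-sar/SAR-Web-System | backend/main.py | _get_available_assets
-- ===== SOURCE A (Python) =====
-- assets = {
--     2021: {"Jan-Jun": "projects/sar-calabarzon/assets/export/2021_S1_LULC_CALABARZON_PRO", "Jul-Dec": "projects/sar-calabarzon/assets/export/2021_S2_LULC_CALABARZON_PRO"},
--     2022: {"Jan-Jun": "projects/sar-calabarzon/assets/export/2022_S1_LULC_CALABARZON_PRO", "Jul-Dec": "projects/sar-calabarzon/assets/export/2022_S2_LULC_CALABARZON_PRO"},
--     2023: {"Jan-Jun": "projects/sar-calabarzon/assets/export/2023_S1_LULC_CALABARZON_PRO", "Jul-Dec": "projects/sar-calabarzon/assets/export/2023_S2_LULC_CALABARZON_PRO"},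
--     2024: {"Jan-Jun": "projects/sar-calabarzon/assets/export/2024_S1_LULC_CALABARZON_PRO", "Jul-Dec": "projects/sar-calabarzon/assets/export/2024_S2_LULC_CALABARZON_PRO"},
--     2025: {"Jan-Jun": "projects/sar-calabarzon/assets/export/2025_S1_LULC_CALABARZON_PRO", "Jul-Dec": "projects/sar-calabarzon/assets/export/2025_S2_LULC_CALABARZON_PRO"}
-- }
--
-- def _get_available_assets(start_year: int, end_year: int) -> list:
--     available = []
--     for yr in range(start_year, end_year + 1):
--         year_data = assets.get(yr)
--         if not year_data:
--             continue
--         for period_name, asset_id in year_data.items():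
--             if asset_id:
--                 available.append((yr, period_name, asset_id))
--     return available
-- ===== SOURCE B (Python) =====
-- assets = {
--     2021: {"Jan-Jun": "projects/sar-calabarzon/assets/export/2021_S1_LULC_CALABARZON_PRO", "Jul-Dec": "projects/sar-calabarzon/assets/export/2021_S2_LULC_CALABARZON_PRO"},
--     2022: {"Jan-Jun": "projects/sar-calabarzon/assets/export/2022_S1_LULC_CALABARZON_PRO", "Jul-Dec": "projects/sar-calabarzon/assets/export/2022_S2_LULC_CALABARZON_PRO"},
--     2023: {"Jan-Jun": "projects/sar-calabarzon/assets/export/2023_S1_LULC_CALABARZON_PRO", "Jul-Dec": "projects/sar-calabarzon/assets/export/2023_S2_LULC_CALABARZON_PRO"},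
--     2024: {"Jan-Jun": "projects/sar-calabarzon/assets/export/2024_S1_LULC_CALABARZON_PRO", "Jul-Dec": "projects/sar-calabarzon/assets/export/2024_S2_LULC_CALABARZON_PRO"},
--     2025: {"Jan-Jun": "projects/sar-calabarzon/assets/export/2025_S1_LULC_CALABARZON_PRO", "Jul-Dec": "projects/sar-calabarzon/assets/export/2025_S2_LULC_CALABARZON_PRO"}
-- }
--
-- def _get_available_assets(start_year: int, end_year: int) -> list:
--     # Iterate over the asset table itself instead of the query range:
--     # cost depends on the (fixed, small) table, not on end_year - start_year.
--     return [(yr, period_name, asset_id)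
--             for yr, year_data in assets.items()
--             if start_year <= yr <= end_year
--             for period_name, asset_id in year_data.items()
--             if asset_id]
-- ===== Notes on version B (the rewrite author's own statement) =====
-- stated objective: faster
-- what changed: B iterates over the fixed assets dictionary with a range-membership test instead of looping over every year in range(start_year, end_year+1) with a dict lookup, so its cost is bounded by the table size rather than the width of the query range.
import Mathlib
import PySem

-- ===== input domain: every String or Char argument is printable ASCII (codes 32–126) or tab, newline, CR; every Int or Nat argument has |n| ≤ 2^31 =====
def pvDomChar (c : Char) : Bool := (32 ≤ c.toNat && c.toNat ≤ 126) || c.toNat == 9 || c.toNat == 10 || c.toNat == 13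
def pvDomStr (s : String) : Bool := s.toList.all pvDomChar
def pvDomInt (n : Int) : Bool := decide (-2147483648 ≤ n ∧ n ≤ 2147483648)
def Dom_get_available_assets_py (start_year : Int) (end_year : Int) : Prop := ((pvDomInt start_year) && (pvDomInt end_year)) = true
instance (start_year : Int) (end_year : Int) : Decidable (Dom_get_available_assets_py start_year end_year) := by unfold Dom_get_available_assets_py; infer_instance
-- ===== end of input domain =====

-- B iterates over the fixed `assets` table with a range-membership test instead of looping
-- over every year in range(start_year, end_year+1); cost bounded by the table, not the range width.

-- the module-level `assets` dict (shared data constant, used by both ports)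
def pvAssets : PySem.Dict Int (PySem.Dict String String) :=
  PySem.Dict.mk
    [ (2021, PySem.Dict.mk [("Jan-Jun", "projects/sar-calabarzon/assets/export/2021_S1_LULC_CALABARZON_PRO"),
                            ("Jul-Dec", "projects/sar-calabarzon/assets/export/2021_S2_LULC_CALABARZON_PRO")]),
      (2022, PySem.Dict.mk [("Jan-Jun", "projects/sar-calabarzon/assets/export/2022_S1_LULC_CALABARZON_PRO"),
                            ("Jul-Dec", "projects/sar-calabarzon/assets/export/2022_S2_LULC_CALABARZON_PRO")]),
      (2023, PySem.Dict.mk [("Jan-Jun", "projects/sar-calabarzon/assets/export/2023_S1_LULC_CALABARZON_PRO"),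
                            ("Jul-Dec", "projects/sar-calabarzon/assets/export/2023_S2_LULC_CALABARZON_PRO")]),
      (2024, PySem.Dict.mk [("Jan-Jun", "projects/sar-calabarzon/assets/export/2024_S1_LULC_CALABARZON_PRO"),
                            ("Jul-Dec", "projects/sar-calabarzon/assets/export/2024_S2_LULC_CALABARZON_PRO")]),
      (2025, PySem.Dict.mk [("Jan-Jun", "projects/sar-calabarzon/assets/export/2025_S1_LULC_CALABARZON_PRO"),
                            ("Jul-Dec", "projects/sar-calabarzon/assets/export/2025_S2_LULC_CALABARZON_PRO")]) ]

-- ===== PORT A =====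
-- literal port of A: for yr in range(start_year, end_year+1): look the year up, skip falsy, append truthy asset ids
def get_available_assets_py (start_year : Int) (end_year : Int) : List (Int × String × String) :=
  (PySem.List.pyRange start_year (end_year + 1) 1).foldl
    (fun available yr =>
      match PySem.Dict.get? pvAssets yr with
      | none => available                                  -- `if not year_data: continue` (None case)
      | some year_data =>
        if PySem.Dict.size year_data = 0 then available    -- `if not year_data: continue` (empty-dict case)
        else (PySem.Dict.items year_data).foldl
          (fun available pa =>
            if pa.2 ≠ "" then available ++ [(yr, pa.1, pa.2)] else available)  -- `if asset_id`
          available)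
    []

-- ===== PORT B =====
-- literal port of B: a comprehension over assets.items() filtered by start_year <= yr <= end_year
def get_available_assets_py_alt (start_year : Int) (end_year : Int) : List (Int × String × String) :=
  (PySem.Dict.items pvAssets).flatMap
    (fun p =>
      if start_year ≤ p.1 ∧ p.1 ≤ end_year then
        (PySem.Dict.items p.2).flatMap
          (fun q => if q.2 ≠ "" then [(p.1, q.1, q.2)] else [])
      else [])

-- ===== PRECONDITION & SPEC =====
def Spec_get_available_assets_py (start_year : Int) (end_year : Int) (out : List (Int × String × String)) : Prop := out = get_available_assets_py_alt start_year end_year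
instance (start_year : Int) (end_year : Int) (out : List (Int × String × String)) : Decidable (Spec_get_available_assets_py start_year end_year out) := by unfold Spec_get_available_assets_py; infer_instance

-- ===== CLAIM (what is proved, stated in full; the proofs are below) =====
def Claim_equal_get_available_assets_py : Prop := ∀ (start_year : Int) (end_year : Int), Dom_get_available_assets_py start_year end_year → Spec_get_available_assets_py start_year end_year (get_available_assets_py start_year end_year)

-- ===== LEMMAS AND PROOFS =====

-- the contribution of one year of A's loop, as a plain list
def pvContrib (yr : Int) : List (Int × String × String) :=
  match PySem.Dict.get? pvAssets yr with
  | none => []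
  | some year_data =>
    if PySem.Dict.size year_data = 0 then []
    else ((PySem.Dict.items year_data).filter (fun q => decide (q.2 ≠ ""))).map
      (fun q => (yr, q.1, q.2))

-- A's whole loop over an arbitrary integer range
def pvF (a b : Int) : List (Int × String × String) :=
  (PySem.List.pyRange a b 1).flatMap pvContrib

lemma pvA_eq_F (s e : Int) : get_available_assets_py s e = pvF s (e + 1) := by
  unfold get_available_assets_py pvF
  rw [show (fun (available : List (Int × String × String)) (yr : Int) =>
      match PySem.Dict.get? pvAssets yr with
      | none => available
      | some year_data =>
        if PySem.Dict.size year_data = 0 then available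
        else (PySem.Dict.items year_data).foldl
          (fun available pa =>
            if pa.2 ≠ "" then available ++ [(yr, pa.1, pa.2)] else available)
          available)
    = (fun available yr => available ++ pvContrib yr) from ?_]
  · exact (PySem.List.foldl_append_eq_flatMap pvContrib (PySem.List.pyRange s (e + 1) 1) []).trans (List.nil_append _)
  · funext available yr
    unfold pvContrib
    cases PySem.Dict.get? pvAssets yr with
    | none => simp
    | some yd =>
      by_cases h : PySem.Dict.size yd = 0
      · simp [h]
      · simp only [h, if_false]
        exact PySem.List.foldl_append_ite (fun q : String × String => q.2 ≠ "") _ _ _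

lemma pvContrib_out (yr : Int) (h : yr < 2021 ∨ 2025 < yr) : pvContrib yr = [] := by
  have h1 : PySem.Dict.get? pvAssets yr = none := by
    unfold pvAssets
    rw [PySem.Dict.get?_mk_cons, PySem.Dict.get?_mk_cons, PySem.Dict.get?_mk_cons,
        PySem.Dict.get?_mk_cons, PySem.Dict.get?_mk_cons]
    have e1 : ((2021 : Int) == yr) = false := by simp; omega
    have e2 : ((2022 : Int) == yr) = false := by simp; omega
    have e3 : ((2023 : Int) == yr) = false := by simp; omega
    have e4 : ((2024 : Int) == yr) = false := by simp; omega
    have e5 : ((2025 : Int) == yr) = false := by simp; omega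
    simp [e1, e2, e3, e4, e5, PySem.Dict.get?]
  unfold pvContrib
  rw [h1]

lemma pvF_low : ∀ (k : Nat) (b : Int), pvF (2021 - (k : Int)) b = pvF 2021 b := by
  intro k
  induction k with
  | zero => intro b; norm_num
  | succ k ih =>
    intro b
    rw [show ((k + 1 : Nat) : Int) = (k : Int) + 1 by push_cast; ring]
    by_cases h : (2021 - ((k : Int) + 1)) < b
    · unfold pvF
      rw [PySem.List.pyRange_one_cons h]
      rw [List.flatMap_cons, pvContrib_out _ (by left; omega)]
      have : 2021 - ((k : Int) + 1) + 1 = 2021 - (k : Int) := by omega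
      rw [List.nil_append, this]
      exact ih b
    · unfold pvF
      rw [PySem.List.pyRange_one_eq_nil (by omega), PySem.List.pyRange_one_eq_nil (by omega)]

lemma pvF_high : ∀ (k : Nat) (a : Int), pvF a (2026 + (k : Int)) = pvF a 2026 := by
  intro k
  induction k with
  | zero => intro a; norm_num
  | succ k ih =>
    intro a
    rw [show ((k + 1 : Nat) : Int) = (k : Int) + 1 by push_cast; ring]
    by_cases h : a ≤ 2026 + (k : Int)
    · unfold pvF
      have : (2026 + ((k : Int) + 1)) = (2026 + (k : Int)) + 1 := by omega
      rw [this, PySem.List.pyRange_one_succ_right h, List.flatMap_append]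
      rw [show List.flatMap pvContrib [2026 + (k : Int)] = [] by
        simp [pvContrib_out (2026 + (k : Int)) (by right; omega)]]
      rw [List.append_nil]
      have := ih a
      unfold pvF at this
      exact this
    · unfold pvF
      rw [PySem.List.pyRange_one_eq_nil (by omega), PySem.List.pyRange_one_eq_nil (by omega)]

-- clamp the range to [2021, 2026]
lemma pvF_clamp (s t : Int) : pvF s t = pvF (max (min s 2026) 2021) (max (min t 2026) 2021) := by
  by_cases hb : t ≤ 2021
  · have h1 : pvF s t = [] := by
      unfold pvF
      rw [List.flatMap_eq_nil_iff]
      intro x hx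
      rw [PySem.List.mem_pyRange_one] at hx
      exact pvContrib_out x (by left; omega)
    have h2 : max (min t 2026) 2021 = 2021 := by omega
    rw [h1, h2]
    unfold pvF
    rw [PySem.List.pyRange_one_eq_nil (by omega)]
    rfl
  · by_cases ha : 2026 ≤ s
    · have h1 : pvF s t = [] := by
        unfold pvF
        rw [List.flatMap_eq_nil_iff]
        intro x hx
        rw [PySem.List.mem_pyRange_one] at hx
        exact pvContrib_out x (by right; omega)
      have h2 : max (min s 2026) 2021 = 2026 := by omega
      rw [h1, h2]
      unfold pvF
      rw [PySem.List.pyRange_one_eq_nil (by omega)]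
      rfl
    · -- s < 2026, 2021 < t
      have step1 : pvF s t = pvF (max s 2021) t := by
        by_cases hs : s < 2021
        · have hk : s = 2021 - ((2021 - s).toNat : Int) := by omega
          have := pvF_low (2021 - s).toNat t
          rw [← hk] at this
          rw [this]
          congr 1
          omega
        · congr 1; omega
      have step2 : pvF (max s 2021) t = pvF (max s 2021) (min t 2026) := by
        by_cases ht : 2026 < t
        · have hk : t = 2026 + ((t - 2026).toNat : Int) := by omega
          have := pvF_high (t - 2026).toNat (max s 2021)
          rw [← hk] at this
          rw [this]
          congr 1
          omega
        · congr 1; omega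
      rw [step1, step2]
      congr 1 <;> omega

-- A's loop over a clamped range, written as five guarded blocks
lemma pvF_clamped (a b : Int) (ha1 : 2021 ≤ a) (ha2 : a ≤ 2026) (hb1 : 2021 ≤ b) (hb2 : b ≤ 2026) :
    pvF a b =
      (if a ≤ 2021 ∧ 2021 < b then pvContrib 2021 else []) ++
      ((if a ≤ 2022 ∧ 2022 < b then pvContrib 2022 else []) ++
      ((if a ≤ 2023 ∧ 2023 < b then pvContrib 2023 else []) ++
      ((if a ≤ 2024 ∧ 2024 < b then pvContrib 2024 else []) ++
      (if a ≤ 2025 ∧ 2025 < b then pvContrib 2025 else [])))) := by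
  interval_cases a <;> interval_cases b <;> decide

theorem get_available_assets_py_spec_aux (s e : Int) :
    get_available_assets_py s e = get_available_assets_py_alt s e := by
  rw [pvA_eq_F, pvF_clamp]
  rw [pvF_clamped _ _ (by omega) (by omega) (by omega) (by omega)]
  have g : ∀ yr : Int, 2021 ≤ yr → yr ≤ 2025 →
      ((max (min s 2026) 2021 ≤ yr ∧ yr < max (min (e + 1) 2026) 2021) ↔ (s ≤ yr ∧ yr ≤ e)) := by
    intro yr h1 h2; omega
  rw [if_congr (g 2021 (by omega) (by omega)) rfl rfl,
      if_congr (g 2022 (by omega) (by omega)) rfl rfl,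
      if_congr (g 2023 (by omega) (by omega)) rfl rfl,
      if_congr (g 2024 (by omega) (by omega)) rfl rfl,
      if_congr (g 2025 (by omega) (by omega)) rfl rfl]
  by_cases h1 : s ≤ 2021 ∧ 2021 ≤ e <;>
  by_cases h2 : s ≤ 2022 ∧ 2022 ≤ e <;>
  by_cases h3 : s ≤ 2023 ∧ 2023 ≤ e <;>
  by_cases h4 : s ≤ 2024 ∧ 2024 ≤ e <;>
  by_cases h5 : s ≤ 2025 ∧ 2025 ≤ e <;>
    simp only [get_available_assets_py_alt, pvAssets, List.flatMap_cons,
      List.flatMap_nil, List.append_nil, h1, h2, h3, h4, h5] <;>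
    decide

-- ===== VERDICT (by name: the statement is the Claim_ definition above) =====
theorem get_available_assets_py_spec : Claim_equal_get_available_assets_py := by
  intro s e _
  exact get_available_assets_py_spec_aux s e
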